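-- pv_equiv track=rewrite | github.com/Chhunkea/Python-Online-Jude | judge3/main2.py | factorial_process
-- ===== SOURCE A (Python) =====
-- def factorial_process(N):
--     if N == 0 or N == 1:
--         return f"{N}!=1"
--     else:
--         factorial = f"{N}!=("
--         result = 1
--         for i in range(1, N + 1):
--             result *= i
--             factorial += str(i)
--             if i < N:
--                 factorial += "*"
--         factorial += f")={result}"
--         return factorial
-- ===== SOURCE B (Python) =====
-- def factorial_process(N):
--     if N == 0 or N == 1:
--         return f"{N}!=1"
--     s, p = _chain(1, N)
--     return f"{N}!=({s})={p}"
--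
-- def _chain(lo, hi):
--     # divide and conquer: (expression string, product) for the factors lo..hi
--     if lo > hi:
--         return ("", 1)
--     if lo == hi:
--         return (str(lo), lo)
--     mid = (lo + hi) // 2
--     s1, p1 = _chain(lo, mid)
--     s2, p2 = _chain(mid + 1, hi)
--     return (s1 + "*" + s2, p1 * p2)
-- ===== Notes on version B (the rewrite author's own statement) =====
-- stated objective: alternative
-- what changed: Replaces A's single left-to-right loop with manual separator bookkeeping ('if i < N') by a divide-and-conquer helper that recursively splits the factor range at its midpoint and combines the (expression string, product) pairs of the two halves, giving a balanced product tree instead of a linear accumulation.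
import Mathlib
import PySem

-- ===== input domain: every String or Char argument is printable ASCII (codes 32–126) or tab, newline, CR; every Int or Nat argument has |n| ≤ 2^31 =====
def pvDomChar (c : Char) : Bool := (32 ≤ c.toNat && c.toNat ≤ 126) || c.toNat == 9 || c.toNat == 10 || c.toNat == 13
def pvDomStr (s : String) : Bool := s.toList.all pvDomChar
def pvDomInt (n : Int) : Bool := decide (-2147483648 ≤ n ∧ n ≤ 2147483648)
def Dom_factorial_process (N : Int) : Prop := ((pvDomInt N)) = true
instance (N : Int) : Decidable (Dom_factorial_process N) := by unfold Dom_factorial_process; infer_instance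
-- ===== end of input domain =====

-- B replaces A's forward loop with manual separator bookkeeping by a top-down recursive
-- helper returning the (expression string, product) pair (alternative decomposition).


-- ===== PORT A =====
def factorial_process (N : Int) : String :=
  if N == 0 || N == 1 then PySem.Int.toStr N ++ "!=1"
  else
    let st := (PySem.List.pyRange 1 (N + 1) 1).foldl
      (fun (st : String × Int) i =>
        let r := st.2 * i
        let f := st.1 ++ PySem.Int.toStr i
        let f := if i < N then f ++ "*" else f
        (f, r))
      (PySem.Int.toStr N ++ "!=(", 1)
    st.1 ++ ")=" ++ PySem.Int.toStr st.2

-- ===== PORT B =====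
-- divide-and-conquer helper _chain from Source B
def pvChain (lo hi : Int) : String × Int :=
  if hgt : lo > hi then ("", 1)
  else if heq : lo == hi then (PySem.Int.toStr lo, lo)
  else
    let mid := PySem.Int.floordiv (lo + hi) 2
    let l := pvChain lo mid
    let r := pvChain (mid + 1) hi
    (l.1 ++ "*" ++ r.1, l.2 * r.2)
termination_by (hi - lo).toNat
decreasing_by
  all_goals
  · simp only [gt_iff_lt, not_lt] at hgt
    have hne : lo ≠ hi := by simpa using heq
    have hb := PySem.Int.floordiv_two_mid_bounds (lo := lo) (hi := hi) hgt
    have h2' : PySem.Int.floordiv (lo + hi) 2 < hi :=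
      (PySem.Int.floordiv_lt_iff_lt_mul (by omega)).mpr (by omega)
    omega

def factorial_process_alt (N : Int) : String :=
  if N == 0 || N == 1 then PySem.Int.toStr N ++ "!=1"
  else
    let sp := pvChain 1 N
    PySem.Int.toStr N ++ "!=(" ++ sp.1 ++ ")=" ++ PySem.Int.toStr sp.2

-- ===== PRECONDITION & SPEC =====
def Spec_factorial_process (N : Int) (out : String) : Prop := out = factorial_process_alt N
instance (N : Int) (out : String) : Decidable (Spec_factorial_process N out) := by unfold Spec_factorial_process; infer_instance

-- ===== CLAIM (what is proved, stated in full; the proofs are below) =====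
def Claim_equal_factorial_process : Prop := ∀ (N : Int), Dom_factorial_process N → Spec_factorial_process N (factorial_process N)

-- ===== LEMMAS AND PROOFS =====

-- the characters contributed by the non-final factors: "<i>*" for each i
def starChunk (l : List Int) : List Char := l.flatMap (fun i => (PySem.Int.toStr i).toList ++ ['*'])

-- A's loop over factors all < N: accumulates "<i>*" per factor and multiplies
theorem loopA (N : Int) (l : List Int) (h : ∀ i ∈ l, i < N) (s : String) (r : Int) :
    (l.foldl (fun (st : String × Int) i =>
        let r := st.2 * i
        let f := st.1 ++ PySem.Int.toStr i
        let f := if i < N then f ++ "*" else f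
        (f, r)) (s, r))
    = (String.ofList (s.toList ++ starChunk l), l.foldl (fun a i => a * i) r) := by
  induction l generalizing s r with
  | nil => simp [starChunk, String.ofList_toList]
  | cons x t ih =>
    have hx : x < N := h x (by simp)
    simp only [List.foldl_cons, if_pos hx]
    rw [ih (fun i hi => h i (by simp [hi]))]
    simp [starChunk]

-- pulling the initial accumulator out of a multiplicative foldl
theorem foldl_mul_shift (l : List Int) (a : Int) :
    l.foldl (fun x y => x * y) a = a * l.foldl (fun x y => x * y) 1 := by
  induction l generalizing a with
  | nil => simp
  | cons x t ih => simp only [List.foldl_cons]; rw [ih (a * x), ih (1 * x)]; ring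

-- pvChain lo lo: a single factor
theorem chainBase (lo : Int) :
    (pvChain lo lo).1.toList = starChunk (PySem.List.pyRange lo lo 1) ++ (PySem.Int.toStr lo).toList ∧
    (pvChain lo lo).2 = (PySem.List.pyRange lo (lo + 1) 1).foldl (fun x y => x * y) 1 := by
  rw [pvChain]
  have hn : PySem.List.pyRange lo lo 1 = [] := PySem.List.pyRange_one_eq_nil (by omega)
  have hs : PySem.List.pyRange lo (lo + 1) 1 = [lo] := PySem.List.pyRange_one_singleton lo
  simp [hn, hs, starChunk]

-- pvChain lo hi is exactly the starChunk of lo..hi-1 followed by str(hi), paired with the product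
theorem chainSpecAux : ∀ (k : Nat) (lo hi : Int), (hi - lo).toNat ≤ k → lo ≤ hi →
    (pvChain lo hi).1.toList = starChunk (PySem.List.pyRange lo hi 1) ++ (PySem.Int.toStr hi).toList ∧
    (pvChain lo hi).2 = (PySem.List.pyRange lo (hi + 1) 1).foldl (fun x y => x * y) 1 := by
  intro k
  induction k with
  | zero =>
    intro lo hi hk hle
    have he : lo = hi := by omega
    subst he; exact chainBase lo
  | succ k ih =>
    intro lo hi hk hle
    by_cases heq : lo = hi
    · subst heq; exact chainBase lo
    · have hlt : lo < hi := by omega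
      have hb := PySem.Int.floordiv_two_mid_bounds (lo := lo) (hi := hi) hle
      have hmidlt : PySem.Int.floordiv (lo + hi) 2 < hi :=
        (PySem.Int.floordiv_lt_iff_lt_mul (by omega)).mpr (by omega)
      set m := PySem.Int.floordiv (lo + hi) 2 with hm
      obtain ⟨is1, ip1⟩ := ih lo m (by omega) (by omega)
      obtain ⟨is2, ip2⟩ := ih (m + 1) hi (by omega) (by omega)
      rw [pvChain]
      have h1' : ¬ lo > hi := by omega
      have h2' : ¬ ((lo == hi) = true) := by simpa using heq
      simp only [dif_neg h1', dif_neg h2', ← hm]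
      constructor
      · have hsp : PySem.List.pyRange lo hi 1
            = PySem.List.pyRange lo (m + 1) 1 ++ PySem.List.pyRange (m + 1) hi 1 :=
          PySem.List.pyRange_one_append lo (m + 1) hi (by omega) (by omega)
        have hsr : PySem.List.pyRange lo (m + 1) 1 = PySem.List.pyRange lo m 1 ++ [m] :=
          PySem.List.pyRange_one_succ_right (by omega)
        simp [hsp, hsr, starChunk, is1, is2]
      · have hsp : PySem.List.pyRange lo (hi + 1) 1
            = PySem.List.pyRange lo (m + 1) 1 ++ PySem.List.pyRange (m + 1) (hi + 1) 1 :=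
          PySem.List.pyRange_one_append lo (m + 1) (hi + 1) (by omega) (by omega)
        rw [hsp, List.foldl_append, foldl_mul_shift]
        simp [ip1, ip2]

theorem chainSpec (lo hi : Int) (h : lo ≤ hi) :
    (pvChain lo hi).1.toList = starChunk (PySem.List.pyRange lo hi 1) ++ (PySem.Int.toStr hi).toList ∧
    (pvChain lo hi).2 = (PySem.List.pyRange lo (hi + 1) 1).foldl (fun x y => x * y) 1 :=
  chainSpecAux (hi - lo).toNat lo hi le_rfl h

-- ===== VERDICT (by name: the statement is the Claim_ definition above) =====
theorem factorial_process_spec : Claim_equal_factorial_process := by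
  intro N _
  unfold Spec_factorial_process factorial_process factorial_process_alt
  by_cases h01 : N == 0 || N == 1
  · simp [h01]
  · simp only [h01, Bool.false_eq_true, if_false]
    by_cases hN : 2 ≤ N
    · have hsplit : PySem.List.pyRange 1 (N + 1) 1
          = PySem.List.pyRange 1 N 1 ++ [N] := PySem.List.pyRange_one_succ_right (show (1:Int) ≤ N by omega)
      have hlt : ∀ i ∈ PySem.List.pyRange 1 N 1, i < N := by
        intro i hi; exact (PySem.List.mem_pyRange_one.mp hi).2
      rw [hsplit, List.foldl_append, loopA N _ hlt]
      simp only [List.foldl_cons, List.foldl_nil, if_neg (lt_irrefl N)]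
      obtain ⟨hs, hp⟩ := chainSpec 1 N (by omega)
      rw [hsplit] at hp
      simp only [List.foldl_append, List.foldl_cons, List.foldl_nil] at hp
      apply String.toList_inj.mp
      simp [hs, hp]
    · -- N ≤ 1, N ∉ {0,1}: empty range in A, lo > hi branch in B's helper
      simp only [beq_iff_eq, Bool.or_eq_true, not_or] at h01
      have hnil : PySem.List.pyRange 1 (N + 1) 1 = [] :=
        PySem.List.pyRange_one_eq_nil (by omega)
      rw [hnil, pvChain]
      have hgt : (1:Int) > N := by omega
      simp [hgt]
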